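-- pv_equiv track=rewrite | github.com/KevinKuo149/Log-Parser | Priority/am_log_parser.py | exclude_parser
-- ===== SOURCE A (Python) =====
-- def exclude_parser(log_dict, keyword_list):
--     re_log_dict = {}
--     for key in log_dict:
--         temp_log = []
--         for line in log_dict.get(key):
--             is_include = True
--
--             for one_keyword in keyword_list:
--                 if one_keyword in line:
--                     is_include = False
--                     break
--
--             if is_include:
--                 temp_log.append(line)
--
--         if temp_log != []:
--             re_log_dict.update({key:temp_log})
--
--     return re_log_dict
-- ===== SOURCE B (Python) =====
-- def exclude_parser(log_dict, keyword_list):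
--     # Prune redundant keywords once: a keyword that contains an already-kept
--     # keyword as a substring can never match a line the kept one misses.
--     minimal = []
--     for kw in keyword_list:
--         if not any(m in kw for m in minimal):
--             minimal.append(kw)
--     result = {}
--     for key, lines in log_dict.items():
--         kept = [line for line in lines if not any(m in line for m in minimal)]
--         if kept:
--             result[key] = kept
--     return result
-- ===== Notes on version B (the rewrite author's own statement) =====
-- stated objective: alternative
-- what changed: B first prunes the keyword list to its minimal elements (dropping every keyword that contains an already-kept keyword as a substring, which also removes duplicates), then filters each key's lines declaratively with a comprehension over that minimal set, iterating items() directly instead of A's per-key re-lookup and flag-and-break inner loop.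
import Mathlib
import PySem

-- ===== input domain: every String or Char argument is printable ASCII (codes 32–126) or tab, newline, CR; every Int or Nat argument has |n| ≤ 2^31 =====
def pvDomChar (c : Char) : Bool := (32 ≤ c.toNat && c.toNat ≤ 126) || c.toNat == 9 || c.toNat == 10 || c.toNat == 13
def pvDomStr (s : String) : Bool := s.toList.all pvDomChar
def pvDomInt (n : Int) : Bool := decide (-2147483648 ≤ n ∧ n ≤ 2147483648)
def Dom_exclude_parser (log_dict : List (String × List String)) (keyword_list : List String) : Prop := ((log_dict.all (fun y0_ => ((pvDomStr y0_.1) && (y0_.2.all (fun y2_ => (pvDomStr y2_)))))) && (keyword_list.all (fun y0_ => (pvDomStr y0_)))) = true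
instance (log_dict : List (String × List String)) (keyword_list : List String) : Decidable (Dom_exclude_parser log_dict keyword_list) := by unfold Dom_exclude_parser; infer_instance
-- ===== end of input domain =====

-- B prunes the keyword list to its minimal elements once and filters lines declaratively
-- over that minimal set (alternative decomposition; A's flag-and-break loop and per-key
-- re-lookup disappear). Equivalence proved for log_dicts with distinct keys.


-- ===== PORT A =====
-- `log_dict.get(key)`: first-match association-list lookup (key always present, so `.getD []`
-- is never the None branch on admitted inputs)
def aGet (log_dict : List (String × List String)) (k : String) : List String :=
  ((log_dict.find? (fun q => q.1 == k)).map (·.2)).getD []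

-- the inner `for one_keyword in keyword_list: … break` loop; returns is_include
def aIsInclude (keyword_list : List String) (line : String) : Bool :=
  match keyword_list with
  | [] => true
  | kw :: rest => if PySem.Str.isIn kw line then false else aIsInclude rest line

def exclude_parser (log_dict : List (String × List String)) (keyword_list : List String) : List (String × List String) :=
  (log_dict.foldl
    (fun re_log_dict p =>
      let temp_log := (aGet log_dict p.1).foldl
        (fun acc line => if aIsInclude keyword_list line then acc ++ [line] else acc) []
      if temp_log ≠ [] then re_log_dict.insert p.1 temp_log else re_log_dict)
    (PySem.Dict.empty : PySem.Dict String (List String))).items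

-- ===== PORT B =====
-- prune: keep kw unless some already-kept keyword is a substring of it
def bMinimal (keyword_list : List String) : List String :=
  keyword_list.foldl
    (fun minimal kw => if minimal.any (fun m => PySem.Str.isIn m kw) then minimal else minimal ++ [kw]) []

def exclude_parser_alt (log_dict : List (String × List String)) (keyword_list : List String) : List (String × List String) :=
  let minimal := bMinimal keyword_list
  (log_dict.foldl
    (fun result p =>
      let kept := p.2.filter (fun line => !(minimal.any (fun m => PySem.Str.isIn m line)))
      if kept = [] then result else result.insert p.1 kept)
    (PySem.Dict.empty : PySem.Dict String (List String))).items

-- ===== PRECONDITION & SPEC =====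
-- Pre_ excludes log_dict with duplicate keys: A's argument is a Python dict, where duplicate
-- keys cannot exist (the association list collapses before A is ever called), so the ports'
-- behaviours there (first-match lookup vs direct iteration) are both arbitrary.
def Pre_exclude_parser (log_dict : List (String × List String)) (keyword_list : List String) : Prop :=
  (log_dict.map (·.1)).Nodup
instance (log_dict : List (String × List String)) (keyword_list : List String) : Decidable (Pre_exclude_parser log_dict keyword_list) := by unfold Pre_exclude_parser; infer_instance

def pvWitness_exclude_parser : (List (String × List String)) × List String :=
  ([("a", ["hello", "err x"]), ("b", ["err"])], ["err"])

def Spec_exclude_parser (log_dict : List (String × List String)) (keyword_list : List String) (out : List (String × List String)) : Prop := out = exclude_parser_alt log_dict keyword_list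
instance (log_dict : List (String × List String)) (keyword_list : List String) (out : List (String × List String)) : Decidable (Spec_exclude_parser log_dict keyword_list out) := by unfold Spec_exclude_parser; infer_instance

-- ===== CLAIM (what is proved, stated in full; the proofs are below) =====
def Claim_equal_exclude_parser : Prop := ∀ (log_dict : List (String × List String)) (keyword_list : List String), Dom_exclude_parser log_dict keyword_list → Pre_exclude_parser log_dict keyword_list → Spec_exclude_parser log_dict keyword_list (exclude_parser log_dict keyword_list)

-- ===== LEMMAS AND PROOFS =====

-- substring is transitive (via the infix characterisation of PySem.Str.isIn)
theorem isIn_trans {x kw line : String} (h1 : PySem.Str.isIn x kw = true)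
    (h2 : PySem.Str.isIn kw line = true) : PySem.Str.isIn x line = true := by
  rw [PySem.Str.isIn_iff_infix] at *
  exact h1.trans h2

-- pruning preserves "some keyword is a substring of line"
theorem bMinimal_any (keyword_list : List String) (m : List String) (line : String) :
    ((keyword_list.foldl
      (fun minimal kw => if minimal.any (fun x => PySem.Str.isIn x kw) then minimal else minimal ++ [kw]) m).any
      (fun x => PySem.Str.isIn x line))
    = (m.any (fun x => PySem.Str.isIn x line) || keyword_list.any (fun k => PySem.Str.isIn k line)) := by
  induction keyword_list generalizing m with
  | nil => simp
  | cons kw rest ih =>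
    simp only [List.foldl_cons, List.any_cons]
    by_cases h : m.any (fun x => PySem.Str.isIn x kw) = true
    · rw [if_pos h, ih]
      by_cases hl : PySem.Str.isIn kw line = true
      · obtain ⟨x, hx, hxk⟩ := List.any_eq_true.mp h
        have hm : m.any (fun x => PySem.Str.isIn x line) = true :=
          List.any_eq_true.mpr ⟨x, hx, isIn_trans hxk hl⟩
        simp only [PySem.Str.isIn_eq] at hm
        simp [hm]
      · have hf : PySem.Str.isIn kw line = false := Bool.eq_false_iff.mpr hl
        simp only [PySem.Str.isIn_eq] at hf
        simp [hf]
    · rw [if_neg h, ih]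
      simp [Bool.or_assoc]

-- A's flag-and-break loop is the negation of an any over the full keyword list
theorem aIsInclude_eq (keyword_list : List String) (line : String) :
    aIsInclude keyword_list line = !(keyword_list.any (fun k => PySem.Str.isIn k line)) := by
  induction keyword_list with
  | nil => rfl
  | cons kw rest ih =>
    simp only [aIsInclude, List.any_cons]
    cases h : PySem.Str.isIn kw line with
    | true => simp
    | false => simp [ih]

-- hence A's per-line test equals B's per-line test over the pruned list
theorem line_test_eq (keyword_list : List String) (line : String) :
    aIsInclude keyword_list line = !((bMinimal keyword_list).any (fun m => PySem.Str.isIn m line)) := by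
  rw [aIsInclude_eq, bMinimal, bMinimal_any]
  simp

-- with distinct keys, A's re-lookup of a pair's key returns that pair's value
theorem aGet_self (log_dict : List (String × List String)) (p : String × List String)
    (hnd : (log_dict.map (·.1)).Nodup) (hp : p ∈ log_dict) : aGet log_dict p.1 = p.2 := by
  induction log_dict with
  | nil => cases hp
  | cons q rest ih =>
    simp only [List.map_cons, List.nodup_cons] at hnd
    rcases List.mem_cons.mp hp with h | h
    · subst h; simp [aGet]
    · have hq : (q.1 == p.1) = false := by
        refine beq_eq_false_iff_ne.mpr ?_
        intro he
        exact hnd.1 (he ▸ List.mem_map.mpr ⟨p, h, rfl⟩)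
      simpa [aGet, List.find?, hq] using ih hnd.2 h

-- ===== VERDICT (by name: the statement is the Claim_ definition above) =====
theorem exclude_parser_spec : Claim_equal_exclude_parser := by
  intro log_dict keyword_list _ hpre
  unfold Spec_exclude_parser exclude_parser exclude_parser_alt
  congr 1
  apply PySem.List.foldl_congr_mem
  intro acc p hp
  have hget : aGet log_dict p.1 = p.2 := aGet_self log_dict p hpre hp
  rw [hget, PySem.List.foldl_append_if_eq_filter, List.nil_append,
      List.filter_congr (fun line _ => line_test_eq keyword_list line)]
  simp only [ne_eq, ite_not]
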